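-- pv_equiv track=rewrite | github.com/io-fault/sys-factors | vc.py | quotations
-- ===== SOURCE A (Python) =====
-- def quotations(args, quote='"'):
-- 	"""
-- 	# Isolate quotations within a vector expression.
-- 	# Quotations have the highest precedence and must be isolated first.
-- 	"""
-- 	delta = args[:1]
-- 	parts = args.strip().split(quote)
--
-- 	# Usual condition does not apply at the start.
-- 	# If initial field is empty, it's not an escape.
-- 	fields = parts[:1]
-- 	quotes = parts[1:2]
--
-- 	for n, q in zip(parts[2::2], parts[3::2]):
-- 		if not n:
-- 			quotes[-1] += quote + q
-- 		else:
-- 			quotes.append(q)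
-- 			fields.append(n)
--
-- 	nparts = len(parts)
-- 	if nparts > 2 and nparts % 2 != 0 and parts[-1]:
-- 		# Loop stopped short on the zip.
-- 		fields.append(parts[-1])
--
-- 	return delta, fields, quotes
-- ===== SOURCE B (Python) =====
-- def quotations(args, quote='"'):
-- 	"""
-- 	# Isolate quotations within a vector expression.
-- 	# Quotations have the highest precedence and must be isolated first.
-- 	"""
-- 	delta = args[:1]
-- 	s = args.strip()
-- 	fields = [[]]
-- 	quotes = []
-- 	in_quote = False
-- 	field_open = True
-- 	i = 0
-- 	n = len(s)
-- 	step = len(quote)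
-- 	while i < n:
-- 		if s.startswith(quote, i):
-- 			if in_quote:
-- 				# closing quote
-- 				in_quote = False
-- 				field_open = False
-- 			elif field_open:
-- 				# open a new quotation
-- 				quotes.append([])
-- 				in_quote = True
-- 			else:
-- 				# quote right after a closed quote: escaped literal quote
-- 				quotes[-1].append(quote)
-- 				in_quote = True
-- 			i += step
-- 		else:
-- 			if in_quote:
-- 				quotes[-1].append(s[i])
-- 			elif field_open:
-- 				fields[-1].append(s[i])
-- 			else:
-- 				fields.append([s[i]])
-- 				field_open = True
-- 			i += 1
-- 	return delta, [''.join(f) for f in fields], [''.join(qc) for qc in quotes]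
-- ===== Notes on version B (the rewrite author's own statement) =====
-- stated objective: alternative
-- what changed: A splits the stripped string on the quote separator and then re-pairs the pieces with zip/stride slices plus a parity rule for the trailing piece; B never splits: it makes a single left-to-right scan with an in_quote/field_open state machine, growing the current field or quotation character by character and treating a quote right after a closed quote as an escape.
import Mathlib
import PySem

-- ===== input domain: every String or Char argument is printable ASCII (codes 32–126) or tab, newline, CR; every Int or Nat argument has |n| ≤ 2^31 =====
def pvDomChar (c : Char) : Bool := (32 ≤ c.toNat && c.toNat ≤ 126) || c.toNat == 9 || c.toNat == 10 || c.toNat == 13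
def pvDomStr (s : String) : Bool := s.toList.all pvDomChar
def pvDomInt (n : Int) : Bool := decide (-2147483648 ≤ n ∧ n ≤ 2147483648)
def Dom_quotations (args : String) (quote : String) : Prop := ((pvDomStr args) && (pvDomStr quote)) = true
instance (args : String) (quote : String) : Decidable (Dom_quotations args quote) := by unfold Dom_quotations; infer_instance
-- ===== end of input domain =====

-- B replaces A's split/zip/pairing pipeline by a single left-to-right state-machine scan
-- (objective: alternative decomposition, one pass over the characters).

-- `xs[-1] += v` on a list of strings (never reached with xs = [] by either port inside Pre_).
def pvAddLast (xs : List (List Char)) (v : List Char) : List (List Char) :=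
  match xs with
  | [] => []
  | [x] => [x ++ v]
  | x :: rest => x :: pvAddLast rest v

-- ===== PORT A =====
def quotations (args : String) (quote : String) : String × List String × List String :=
  -- delta = args[:1]
  let delta := PySem.Str.slice args none (some 1)
  let q := quote.toList
  -- parts = args.strip().split(quote); split raises ValueError for an empty separator (excluded by Pre_)
  let parts := (PySem.Chars.split? (PySem.Chars.strip args.toList) q).getD []
  -- fields = parts[:1]; quotes = parts[1:2]
  let fields := PySem.List.slice parts none (some 1)
  let quotes := PySem.List.slice parts (some 1) (some 2)
  -- for n, q in zip(parts[2::2], parts[3::2]): …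
  let pairs := List.zip ((PySem.List.slice? parts (some 2) none 2).getD [])
                        ((PySem.List.slice? parts (some 3) none 2).getD [])
  let fq := pairs.foldl
    (fun (st : List (List Char) × List (List Char)) (p : List Char × List Char) =>
      if p.1 = [] then (st.1, pvAddLast st.2 (q ++ p.2))
      else (st.1 ++ [p.1], st.2 ++ [p.2]))
    (fields, quotes)
  -- if nparts > 2 and nparts % 2 != 0 and parts[-1]: fields.append(parts[-1])
  let nparts := parts.length
  let fq2 := if 2 < nparts ∧ nparts % 2 ≠ 0 ∧ (PySem.List.pyGet? parts (-1)).getD [] ≠ []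
    then (fq.1 ++ [(PySem.List.pyGet? parts (-1)).getD []], fq.2) else fq
  (delta, fq2.1.map String.ofList, fq2.2.map String.ofList)

-- ===== PORT B =====
-- the while-loop of Source B; fuel counts loop steps (each step consumes ≥ 1 character whenever
-- quote ≠ [], so fuel = |l| suffices; for an empty quote the Python loop diverges — excluded by Pre_)
def quotationsAltGo (q : List Char) (fuel : Nat) (l : List Char) (inq fopen : Bool)
    (fields quotes : List (List Char)) : List (List Char) × List (List Char) :=
  match fuel, l with
  | 0, _ => (fields, quotes)
  | _ + 1, [] => (fields, quotes)
  | fuel + 1, c :: rest =>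
    if q.isPrefixOf (c :: rest) then
      if inq then
        -- closing quote
        quotationsAltGo q fuel ((c :: rest).drop q.length) false false fields quotes
      else if fopen then
        -- open a new quotation
        quotationsAltGo q fuel ((c :: rest).drop q.length) true fopen fields (quotes ++ [[]])
      else
        -- quote immediately after a closed quote: escaped literal quote
        quotationsAltGo q fuel ((c :: rest).drop q.length) true fopen fields (pvAddLast quotes q)
    else
      if inq then
        quotationsAltGo q fuel rest inq fopen fields (pvAddLast quotes [c])
      else if fopen then
        quotationsAltGo q fuel rest inq fopen (pvAddLast fields [c]) quotes
      else
        quotationsAltGo q fuel rest inq true (fields ++ [[c]]) quotes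

def quotations_alt (args : String) (quote : String) : String × List String × List String :=
  let delta := PySem.Str.slice args none (some 1)
  let s := PySem.Chars.strip args.toList
  let fq := quotationsAltGo quote.toList s.length s false true [[]] []
  (delta, fq.1.map String.ofList, fq.2.map String.ofList)

-- ===== PRECONDITION & SPEC =====
-- Pre_ excludes only an empty quote separator: there A's str.split raises ValueError.
def Pre_quotations (args : String) (quote : String) : Prop := quote ≠ ""
instance (args : String) (quote : String) : Decidable (Pre_quotations args quote) := by
  unfold Pre_quotations; infer_instance

def pvWitness_quotations : String × String := (" cc \"q1\" mid \"\"\"q2\" t ", "\"")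

def Spec_quotations (args : String) (quote : String) (out : String × List String × List String) : Prop := out = quotations_alt args quote
instance (args : String) (quote : String) (out : String × List String × List String) : Decidable (Spec_quotations args quote out) := by unfold Spec_quotations; infer_instance

-- ===== CLAIM (what is proved, stated in full; the proofs are below) =====
def Claim_equal_quotations : Prop := ∀ (args : String) (quote : String), Dom_quotations args quote → Pre_quotations args quote → Spec_quotations args quote (quotations args quote)

-- ===== LEMMAS AND PROOFS =====

theorem pvAddLast_cons_cons (x y : List Char) (r : List (List Char)) (v : List Char) :
    pvAddLast (x :: y :: r) v = x :: pvAddLast (y :: r) v := rfl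

theorem pvAddLast_ne_nil (xs : List (List Char)) (v : List Char) (h : xs ≠ []) :
    pvAddLast xs v ≠ [] := by
  cases xs with
  | nil => exact absurd rfl h
  | cons x r => cases r <;> simp [pvAddLast]

theorem pvAddLast_nil (xs : List (List Char)) : pvAddLast xs [] = xs := by
  induction xs with
  | nil => rfl
  | cons x rest ih =>
    cases rest with
    | nil => simp [pvAddLast]
    | cons y r => rw [pvAddLast_cons_cons, ih]

theorem pvAddLast_addLast (xs : List (List Char)) (u v : List Char) :
    pvAddLast (pvAddLast xs u) v = pvAddLast xs (u ++ v) := by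
  induction xs with
  | nil => rfl
  | cons x rest ih =>
    cases rest with
    | nil => simp [pvAddLast]
    | cons y r =>
      rcases hpa : pvAddLast (y :: r) u with _ | ⟨z, zs⟩
      · exact absurd hpa (pvAddLast_ne_nil _ _ (by simp))
      · rw [pvAddLast_cons_cons, hpa, pvAddLast_cons_cons, ← hpa, ih,
          pvAddLast_cons_cons]

theorem pvAddLast_append_singleton (xs : List (List Char)) (x v : List Char) :
    pvAddLast (xs ++ [x]) v = xs ++ [x ++ v] := by
  induction xs with
  | nil => rfl
  | cons y rest ih =>
    cases rest with
    | nil => rfl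
    | cons z r =>
      rw [List.cons_append, show z :: r ++ [x] = z :: (r ++ [x]) from rfl,
        pvAddLast_cons_cons, show pvAddLast (z :: (r ++ [x])) v = pvAddLast (z :: r ++ [x]) v from rfl,
        ih]
      simp

-- clean fuel-indexed form of PySem.Chars.splitOn
def pvP (q : List Char) : Nat → List Char → List (List Char)
  | _, [] => [[]]
  | 0, l => [l]
  | fuel + 1, c :: rest =>
    if q.isPrefixOf (c :: rest) then [] :: pvP q fuel ((c :: rest).drop q.length)
    else
      match pvP q fuel rest with
      | [] => []
      | p :: ps => (c :: p) :: ps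

-- canonical parts list: split of l by q
def pvParts (q l : List Char) : List (List Char) := pvP q l.length l

theorem pvP_nil (q : List Char) (fuel : Nat) : pvP q fuel [] = [[]] := by
  cases fuel <;> rfl

theorem pvP_succ_cons (q : List Char) (fuel : Nat) (c : Char) (rest : List Char) :
    pvP q (fuel + 1) (c :: rest) =
      (if q.isPrefixOf (c :: rest) then [] :: pvP q fuel ((c :: rest).drop q.length)
       else match pvP q fuel rest with
       | [] => []
       | p :: ps => (c :: p) :: ps) := rfl

theorem pvP_ne_nil (q : List Char) (fuel : Nat) (l : List Char) : pvP q fuel l ≠ [] := by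
  induction fuel generalizing l with
  | zero => cases l <;> simp [pvP]
  | succ f ih =>
    cases l with
    | nil => simp [pvP]
    | cons c rest =>
      rw [pvP_succ_cons]
      split
      · simp
      · rcases h : pvP q f rest with _ | ⟨p, ps⟩
        · exact absurd h (ih rest)
        · simp

theorem pvGo_spec' (q : List Char) (fuel : Nat) : ∀ (l cur : List Char) (acc : List (List Char)),
    PySem.Chars.splitOn.go q fuel l cur acc =
      acc.reverse ++ (match pvP q fuel l with
        | [] => []
        | p :: ps => (cur.reverse ++ p) :: ps) := by
  induction fuel with
  | zero =>
    intro l cur acc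
    rw [PySem.Chars.splitOn.go]
    cases l with
    | nil => simp [pvP]
    | cons c rest => simp [pvP]
  | succ f ih =>
    intro l cur acc
    cases l with
    | nil => simp [PySem.Chars.splitOn.go, pvP_nil]
    | cons c rest =>
      rw [PySem.Chars.splitOn.go, pvP_succ_cons]
      split
      · rw [ih]
        rcases h : pvP q f ((c :: rest).drop q.length) with _ | ⟨p, ps⟩
        · exact absurd h (pvP_ne_nil q f _)
        · simp
      · rw [ih]
        rcases h : pvP q f rest with _ | ⟨p, ps⟩
        · exact absurd h (pvP_ne_nil q f _)
        · simp

theorem pvSplitOn_eq (q s : List Char) :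
    PySem.Chars.splitOn s q = pvP q (s.length + 1) s := by
  rw [PySem.Chars.splitOn, pvGo_spec']
  rcases h : pvP q (s.length + 1) s with _ | ⟨p, ps⟩
  · exact absurd h (pvP_ne_nil q _ _)
  · simp

theorem pvP_fuelAux (q : List Char) (hq : q ≠ []) :
    ∀ (n : Nat) (l : List Char), l.length ≤ n → ∀ fuel, l.length ≤ fuel →
      pvP q fuel l = pvP q l.length l := by
  intro n
  induction n with
  | zero =>
    intro l hl fuel _
    have : l = [] := by cases l <;> simp_all
    subst this; cases fuel <;> simp [pvP]
  | succ m ih =>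
    intro l hl fuel hf
    cases l with
    | nil => cases fuel <;> simp [pvP]
    | cons c rest =>
      simp only [List.length_cons] at hl hf
      obtain ⟨f, rfl⟩ : ∃ f, fuel = f + 1 := ⟨fuel - 1, by omega⟩
      simp only [List.length_cons]
      rw [pvP_succ_cons, pvP_succ_cons]
      have hql : 1 ≤ q.length := by cases q <;> simp_all
      have hdrop : ((c :: rest).drop q.length).length ≤ rest.length := by
        simp [List.length_drop]; omega
      split
      · rw [ih ((c :: rest).drop q.length) (by omega) f (by omega),
          ih ((c :: rest).drop q.length) (by omega) rest.length (by omega)]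
      · rw [ih rest (by omega) f (by omega)]

theorem pvParts_eq_splitOn (q s : List Char) (hq : q ≠ []) :
    PySem.Chars.splitOn s q = pvParts q s := by
  rw [pvSplitOn_eq q s, pvParts, pvP_fuelAux q hq (s.length + 1) s (by omega) _ (by omega)]

theorem pvParts_nil (q : List Char) : pvParts q [] = [[]] := rfl

theorem pvParts_cons_pos (q : List Char) (hq : q ≠ []) (c : Char) (rest : List Char)
    (h : q.isPrefixOf (c :: rest)) :
    pvParts q (c :: rest) = [] :: pvParts q ((c :: rest).drop q.length) := by
  have hql : 1 ≤ q.length := by cases q <;> simp_all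
  rw [pvParts, List.length_cons, pvP_succ_cons, if_pos h, pvParts,
    pvP_fuelAux q hq rest.length ((c :: rest).drop q.length)
      (by simp [List.length_drop]; omega) rest.length (by simp [List.length_drop]; omega)]

theorem pvParts_cons_neg (q : List Char) (c : Char) (rest : List Char)
    (h : ¬ q.isPrefixOf (c :: rest)) :
    pvParts q (c :: rest) =
      match pvParts q rest with
      | [] => []
      | p :: ps => (c :: p) :: ps := by
  rw [pvParts, List.length_cons, pvP_succ_cons, if_neg h, pvParts]

-- the common specification: how fields/quotes are assembled from the parts list
def pvGo2 (q : List Char) : List (List Char) → List (List Char) → List (List Char) →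
    List (List Char) × List (List Char)
  | [], fs, qs => (fs, qs)
  | [n], fs, qs => if n = [] then (fs, qs) else (fs ++ [n], qs)
  | n :: qq :: rest, fs, qs =>
    if n = [] then pvGo2 q rest fs (pvAddLast qs (q ++ qq))
    else pvGo2 q rest (fs ++ [n]) (qs ++ [qq])

theorem pvGo2_cons2 (q n qq : List Char) (rest fs qs : List (List Char)) :
    pvGo2 q (n :: qq :: rest) fs qs =
      if n = [] then pvGo2 q rest fs (pvAddLast qs (q ++ qq))
      else pvGo2 q rest (fs ++ [n]) (qs ++ [qq]) := rfl

def pvAssemble (q : List Char) (parts : List (List Char)) :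
    List (List Char) × List (List Char) :=
  match parts with
  | [] => ([], [])
  | [f] => ([f], [])
  | f :: qt :: rest => pvGo2 q rest [f] [qt]

-- elements of a list at even positions
def pvEvery2 : List (List Char) → List (List Char)
  | [] => []
  | [x] => [x]
  | x :: _ :: rest => x :: pvEvery2 rest

-- consecutive pairs of a list
def pvPairs : List (List Char) → List (List Char × List Char)
  | n :: qq :: rest => (n, qq) :: pvPairs rest
  | _ => []

theorem pvRangeFilterMap (m : List (List Char)) :
    (List.range ((m.length + 1) / 2)).filterMap (fun k => m[2 * k]?) = pvEvery2 m := by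
  induction m using pvEvery2.induct with
  | case1 => simp [pvEvery2]
  | case2 x => simp [pvEvery2, List.range_succ]
  | case3 x y rest ih =>
    have hlen : (x :: y :: rest).length = rest.length + 2 := by simp
    rw [pvEvery2, hlen, show (rest.length + 2 + 1) / 2 = (rest.length + 1) / 2 + 1 by omega,
      List.range_succ_eq_map, List.filterMap_cons, List.filterMap_map]
    simp only [Function.comp]
    have h0 : (x :: y :: rest)[2 * 0]? = some x := by simp
    rw [h0]
    have hstep : (fun k => (x :: y :: rest)[2 * (k + 1)]?) = (fun k => rest[2 * k]?) := by
      funext k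
      rw [show 2 * (k + 1) = 2 * k + 1 + 1 by omega]
      simp
    rw [hstep, ih]

theorem pvSliceIdx (n a : Nat) :
    PySem.List.sliceIndices n (some (a : Int)) none 2 = (((min a n : Nat) : Int), (n : Int), 2) := by
  rw [PySem.List.sliceIndices]
  norm_num

theorem pvSliceStep2 (xs : List (List Char)) (a : Nat) :
    (PySem.List.slice? xs (some (a : Int)) none 2).getD [] = pvEvery2 (xs.drop a) := by
  rw [PySem.List.slice?]
  rw [if_neg (by norm_num : ¬ ((2:Int) = 0))]
  rw [pvSliceIdx]
  simp only [Option.getD_some]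
  have hcount : (if (0:Int) < 2 then if ((min a xs.length : Nat) : Int) < (xs.length : Int)
      then (((xs.length : Int) - ((min a xs.length : Nat) : Int) + 2 - 1) / 2).toNat else 0
      else if (xs.length : Int) < ((min a xs.length : Nat) : Int)
      then ((((min a xs.length : Nat) : Int) - (xs.length : Int) + -2 - 1) / -2).toNat else 0)
      = ((xs.drop a).length + 1) / 2 := by
    rw [if_pos (by norm_num : (0:Int) < 2)]
    rw [List.length_drop]
    split
    · omega
    · omega
  rw [hcount]
  have hdropmin : xs.drop (min a xs.length) = xs.drop a := by
    by_cases h : a ≤ xs.length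
    · rw [Nat.min_eq_left h]
    · rw [Nat.min_eq_right (by omega), List.drop_of_length_le (le_refl _),
        List.drop_of_length_le (by omega)]
  have hfun : (fun k : Nat => xs[(((min a xs.length : Nat) : Int) + 2 * (k : Int)).toNat]?)
      = (fun k : Nat => (xs.drop a)[2 * k]?) := by
    funext k
    rw [show (((min a xs.length : Nat) : Int) + 2 * (k : Int)).toNat = min a xs.length + 2 * k by omega]
    rw [← hdropmin, List.getElem?_drop]
  rw [hfun, pvRangeFilterMap]

theorem pvSlice2_eq (xs : List (List Char)) :
    (PySem.List.slice? xs (some 2) none 2).getD [] = pvEvery2 (xs.drop 2) := by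
  simpa using pvSliceStep2 xs 2

theorem pvSlice3_eq (xs : List (List Char)) :
    (PySem.List.slice? xs (some 3) none 2).getD [] = pvEvery2 (xs.drop 3) := by
  simpa using pvSliceStep2 xs 3

theorem pvZip_every2 (r : List (List Char)) :
    List.zip (pvEvery2 r) (pvEvery2 r.tail) = pvPairs r := by
  induction r using pvPairs.induct with
  | case1 n qq rest ih =>
    cases rest with
    | nil => simp [pvEvery2, pvPairs]
    | cons z zs =>
      rw [show pvEvery2 (n :: qq :: z :: zs) = n :: pvEvery2 (z :: zs) from rfl,
        List.tail_cons,
        show pvEvery2 (qq :: z :: zs) = qq :: pvEvery2 zs from rfl,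
        pvPairs, ← ih]
      cases zs with
      | nil => simp [pvEvery2, List.zip]
      | cons w ws => simp [List.zip]
  | case2 r h =>
    rcases r with _ | ⟨x, _ | ⟨y, zs⟩⟩
    · simp [pvEvery2, pvPairs]
    · simp [pvEvery2, pvPairs]
    · exact absurd rfl (fun e => h x y zs e)

theorem pvFoldA (q : List Char) (rest fs qs : List (List Char)) :
    (let fq := (pvPairs rest).foldl
        (fun (st : List (List Char) × List (List Char)) (p : List Char × List Char) =>
          if p.1 = [] then (st.1, pvAddLast st.2 (q ++ p.2))
          else (st.1 ++ [p.1], st.2 ++ [p.2])) (fs, qs)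
     if rest.length % 2 = 1 ∧ rest.getLastD [] ≠ []
     then (fq.1 ++ [rest.getLastD []], fq.2) else fq) = pvGo2 q rest fs qs := by
  induction rest using pvPairs.induct generalizing fs qs with
  | case1 n qq r ih =>
    have hpar : (n :: qq :: r).length % 2 = r.length % 2 := by
      simp only [List.length_cons]; omega
    have hlast : r ≠ [] → (n :: qq :: r).getLastD [] = r.getLastD [] := by
      intro hr
      rcases List.exists_cons_of_ne_nil hr with ⟨z, zs, rfl⟩
      simp
    simp only [pvPairs, List.foldl_cons, pvGo2_cons2]
    by_cases hc : r.length % 2 = 1 ∧ r.getLastD [] ≠ []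
    · have hr : r ≠ [] := by rintro rfl; simp at hc
      have hcond2 : (n :: qq :: r).length % 2 = 1 ∧ (n :: qq :: r).getLastD [] ≠ [] := by
        refine ⟨by rw [hpar]; exact hc.1, by rw [hlast hr]; exact hc.2⟩
      simp only [hlast hr]
      by_cases hn : n = []
      · simp only [hn, reduceIte]
        rw [← ih fs (pvAddLast qs (q ++ qq))]
        simp only [if_pos hc]
        rw [if_pos ⟨by simpa [hn] using hcond2.1, hc.2⟩]
      · simp only [hn, reduceIte]
        rw [← ih (fs ++ [n]) (qs ++ [qq])]
        simp only [if_pos hc]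
        rw [if_pos ⟨hcond2.1, hc.2⟩]
    · have hcond2 : ¬ ((n :: qq :: r).length % 2 = 1 ∧ (n :: qq :: r).getLastD [] ≠ []) := by
        intro h2
        rcases Decidable.em (r = []) with rfl | hr
        · simp at h2
        · exact hc ⟨by rw [← hpar]; exact h2.1, by rw [← hlast hr]; exact h2.2⟩
      simp only [if_neg hcond2]
      by_cases hn : n = []
      · simp only [hn, reduceIte]
        rw [← ih fs (pvAddLast qs (q ++ qq))]
        simp only [if_neg hc]
      · simp only [hn, reduceIte]
        rw [← ih (fs ++ [n]) (qs ++ [qq])]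
        simp only [if_neg hc]
  | case2 r h =>
    rcases r with _ | ⟨n, _ | ⟨y, zs⟩⟩
    case cons.cons => exact absurd rfl (fun e => h n y zs e)
    · simp [pvPairs, pvGo2]
    · simp only [pvPairs, List.foldl_nil, List.length_cons, List.length_nil, List.getLastD]
      by_cases hn : n = []
      · simp [hn, pvGo2]
      · simp [hn, pvGo2]

theorem pvGoAlt_succ_cons (q : List Char) (fuel : Nat) (c : Char) (rest : List Char)
    (inq fopen : Bool) (F Q : List (List Char)) :
    quotationsAltGo q (fuel + 1) (c :: rest) inq fopen F Q =
      (if q.isPrefixOf (c :: rest) then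
        if inq then quotationsAltGo q fuel ((c :: rest).drop q.length) false false F Q
        else if fopen then quotationsAltGo q fuel ((c :: rest).drop q.length) true fopen F (Q ++ [[]])
        else quotationsAltGo q fuel ((c :: rest).drop q.length) true fopen F (pvAddLast Q q)
      else
        if inq then quotationsAltGo q fuel rest inq fopen F (pvAddLast Q [c])
        else if fopen then quotationsAltGo q fuel rest inq fopen (pvAddLast F [c]) Q
        else quotationsAltGo q fuel rest inq true (F ++ [[c]]) Q) := rfl

-- the three scanner states of B, expressed through the parts list of the remaining input
theorem pvB_states (q : List Char) (hq : q ≠ []) :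
    ∀ (n : Nat) (l : List Char), l.length ≤ n → ∀ fuel, l.length ≤ fuel →
    ∀ F Q : List (List Char),
      (quotationsAltGo q fuel l false true F Q =
        (match pvParts q l with
         | [] => (F, Q)
         | [p] => (pvAddLast F p, Q)
         | p :: qt :: rest => pvGo2 q rest (pvAddLast F p) (Q ++ [qt]))) ∧
      (∀ fopen, quotationsAltGo q fuel l true fopen F Q =
        pvGo2 q (pvParts q l).tail F (pvAddLast Q (pvParts q l).headI)) ∧
      (quotationsAltGo q fuel l false false F Q = pvGo2 q (pvParts q l) F Q) := by
  intro n
  induction n with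
  | zero =>
    intro l hl fuel hf F Q
    have hl0 : l = [] := by cases l <;> simp_all
    subst hl0
    have h1 : ∀ (inq fopen : Bool), quotationsAltGo q fuel [] inq fopen F Q = (F, Q) := by
      intro inq fopen; cases fuel <;> rfl
    refine ⟨?_, ?_, ?_⟩
    · rw [h1, pvParts_nil]; simp [pvAddLast_nil]
    · intro fopen; rw [h1, pvParts_nil]; simp [pvGo2, pvAddLast_nil]
    · rw [h1, pvParts_nil]; simp [pvGo2]
  | succ m ih =>
    intro l hl fuel hf F Q
    cases l with
    | nil =>
      have h1 : ∀ (inq fopen : Bool), quotationsAltGo q fuel [] inq fopen F Q = (F, Q) := by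
        intro inq fopen; cases fuel <;> rfl
      refine ⟨?_, ?_, ?_⟩
      · rw [h1, pvParts_nil]; simp [pvAddLast_nil]
      · intro fopen; rw [h1, pvParts_nil]; simp [pvGo2, pvAddLast_nil]
      · rw [h1, pvParts_nil]; simp [pvGo2]
    | cons c rest =>
      simp only [List.length_cons] at hl hf
      obtain ⟨f, rfl⟩ : ∃ f, fuel = f + 1 := ⟨fuel - 1, by omega⟩
      have hql : 1 ≤ q.length := by cases q <;> simp_all
      by_cases hpre : q.isPrefixOf (c :: rest)
      · -- a quote occurrence starts here
        set l' := (c :: rest).drop q.length with hl'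
        have hlen' : l'.length ≤ m := by
          simp only [hl', List.length_drop, List.length_cons]; omega
        have hfuel' : l'.length ≤ f := by
          simp only [hl', List.length_drop, List.length_cons]; omega
        have hparts : pvParts q (c :: rest) = [] :: pvParts q l' :=
          pvParts_cons_pos q hq c rest hpre
        have hne : pvParts q l' ≠ [] := pvP_ne_nil q _ _
        rcases hp' : pvParts q l' with _ | ⟨qt, rest'⟩
        · exact absurd hp' hne
        refine ⟨?_, ?_, ?_⟩
        · -- outside, field open: opens a quotation
          rw [pvGoAlt_succ_cons, if_pos hpre, if_neg (by simp), if_pos rfl]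
          have := (ih l' hlen' f hfuel' F (Q ++ [[]])).2.1 true
          rw [this, hparts, hp']
          simp only [List.tail_cons, List.headI]
          rw [pvAddLast_append_singleton, List.nil_append]
          cases rest' <;> simp [pvGo2, pvAddLast_nil]
        · -- inside: this closes the quotation
          intro fopen
          rw [pvGoAlt_succ_cons, if_pos hpre, if_pos rfl]
          have := (ih l' hlen' f hfuel' F Q).2.2
          rw [this, hparts, hp', List.tail_cons]
          simp only [List.headI, pvAddLast_nil]
        · -- outside, right after a closed quote: escape
          rw [pvGoAlt_succ_cons, if_pos hpre, if_neg (by simp), if_neg (by simp)]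
          have := (ih l' hlen' f hfuel' F (pvAddLast Q q)).2.1 false
          rw [show List.drop q.length (c :: rest) = l' from rfl, this, hparts, hp', List.tail_cons]
          simp only [List.headI]
          rw [pvGo2, if_pos rfl, pvAddLast_addLast]
      · -- ordinary character
        have hparts := pvParts_cons_neg q c rest hpre
        have hne : pvParts q rest ≠ [] := pvP_ne_nil q _ _
        rcases hp' : pvParts q rest with _ | ⟨p, ps⟩
        · exact absurd hp' hne
        rw [hp'] at hparts
        refine ⟨?_, ?_, ?_⟩
        · rw [pvGoAlt_succ_cons, if_neg hpre, if_neg (by simp), if_pos rfl]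
          have := (ih rest (by omega) f (by omega) (pvAddLast F [c]) Q).1
          rw [this, hp', hparts]
          cases ps with
          | nil => simp only [pvAddLast_addLast]; rfl
          | cons qt rest' => simp only [pvAddLast_addLast]; rfl
        · intro fopen
          rw [pvGoAlt_succ_cons, if_neg hpre, if_pos rfl]
          have := (ih rest (by omega) f (by omega) F (pvAddLast Q [c])).2.1 fopen
          rw [this, hp', hparts, List.tail_cons, List.tail_cons]
          simp only [List.headI, pvAddLast_addLast]
          rfl
        · rw [pvGoAlt_succ_cons, if_neg hpre, if_neg (by simp), if_neg (by simp)]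
          have := (ih rest (by omega) f (by omega) (F ++ [[c]]) Q).1
          rw [this, hp', hparts]
          cases ps with
          | nil =>
            rw [pvGo2, if_neg (by simp)]
            dsimp only
            rw [pvAddLast_append_singleton]
            simp
          | cons qt rest' =>
            rw [pvGo2, if_neg (by simp)]
            dsimp only
            rw [pvAddLast_append_singleton]
            simp

theorem pvB_assemble (q : List Char) (hq : q ≠ []) (s : List Char) :
    quotationsAltGo q s.length s false true [[]] [] = pvAssemble q (pvParts q s) := by
  have h := (pvB_states q hq s.length s (le_refl _) s.length (le_refl _) [[]] []).1
  rw [h]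
  rcases hp : pvParts q s with _ | ⟨p, _ | ⟨qt, rest⟩⟩
  · exact absurd hp (pvP_ne_nil q _ _)
  · simp [pvAssemble, pvAddLast]
  · simp [pvAssemble, pvAddLast]

theorem pvPyGetNegOne (xs : List (List Char)) (h : xs ≠ []) :
    (PySem.List.pyGet? xs (-1)).getD [] = xs.getLastD [] := by
  rw [PySem.List.pyGet?, PySem.List.pyIdx?]
  have hx : 1 ≤ xs.length := by cases xs <;> simp_all
  rw [if_neg (by norm_num), if_pos (by omega : -(xs.length : Int) ≤ -1)]
  simp only [Option.bind_some]
  rw [show (xs.length - (-(-1:Int)).toNat) = xs.length - 1 by norm_num]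
  rw [List.getLastD_eq_getLast?, List.getLast?_eq_getElem?]

-- A's whole parts-processing pipeline equals the common assembly
theorem pvA_assemble (q : List Char) (parts : List (List Char)) (hne : parts ≠ []) :
    (let fields := PySem.List.slice parts none (some 1)
     let quotes := PySem.List.slice parts (some 1) (some 2)
     let pairs := List.zip ((PySem.List.slice? parts (some 2) none 2).getD [])
                           ((PySem.List.slice? parts (some 3) none 2).getD [])
     let fq := pairs.foldl
       (fun (st : List (List Char) × List (List Char)) (p : List Char × List Char) =>
         if p.1 = [] then (st.1, pvAddLast st.2 (q ++ p.2))
         else (st.1 ++ [p.1], st.2 ++ [p.2])) (fields, quotes)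
     let nparts := parts.length
     if 2 < nparts ∧ nparts % 2 ≠ 0 ∧ (PySem.List.pyGet? parts (-1)).getD [] ≠ []
     then (fq.1 ++ [(PySem.List.pyGet? parts (-1)).getD []], fq.2) else fq) =
    pvAssemble q parts := by
  rcases parts with _ | ⟨f, _ | ⟨qt, rest⟩⟩
  · exact absurd rfl hne
  · dsimp only
    rw [pvSlice2_eq, pvSlice3_eq]
    rw [show ([f] : List (List Char)).drop 2 = [] from rfl,
      show ([f] : List (List Char)).drop 3 = [] from rfl]
    rw [show pvEvery2 [] = [] from rfl, List.zip_nil_left, List.foldl_nil]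
    rw [PySem.List.slice_to _ (by norm_num),
      PySem.List.slice_toNat _ (by norm_num) (by norm_num)]
    rw [if_neg (by simp)]
    rfl
  · dsimp only
    rw [pvSlice2_eq, pvSlice3_eq]
    rw [show (f :: qt :: rest).drop 2 = rest from rfl,
      show (f :: qt :: rest).drop 3 = rest.tail by cases rest <;> rfl,
      pvZip_every2]
    have hf1 : PySem.List.slice (f :: qt :: rest) none (some 1) = [f] := by
      rw [PySem.List.slice_to _ (by norm_num)]; rfl
    have hq1 : PySem.List.slice (f :: qt :: rest) (some 1) (some 2) = [qt] := by
      rw [PySem.List.slice_toNat _ (by norm_num) (by norm_num)]; rfl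
    rw [hf1, hq1, pvPyGetNegOne _ (by simp)]
    rw [show pvAssemble q (f :: qt :: rest) = pvGo2 q rest [f] [qt] from rfl]
    rw [← pvFoldA q rest [f] [qt]]
    have hgl : rest ≠ [] → (f :: qt :: rest).getLastD [] = rest.getLastD [] := by
      intro hr
      rcases List.exists_cons_of_ne_nil hr with ⟨z, zs, rfl⟩
      simp
    by_cases hc : rest.length % 2 = 1 ∧ rest.getLastD [] ≠ []
    · have hr : rest ≠ [] := by rintro rfl; simp at hc
      have hA : 2 < (f :: qt :: rest).length ∧ (f :: qt :: rest).length % 2 ≠ 0 ∧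
          (f :: qt :: rest).getLastD [] ≠ [] := by
        refine ⟨by simp; exact List.length_pos_of_ne_nil hr, ?_, by rw [hgl hr]; exact hc.2⟩
        simp only [List.length_cons]
        omega
      rw [if_pos hA]
      simp only [if_pos hc]
      rw [hgl hr]
    · have hA : ¬ (2 < (f :: qt :: rest).length ∧ (f :: qt :: rest).length % 2 ≠ 0 ∧
          (f :: qt :: rest).getLastD [] ≠ []) := by
        intro h2
        rcases Decidable.em (rest = []) with rfl | hr
        · simp at h2
        · refine hc ⟨?_, by rw [← hgl hr]; exact h2.2.2⟩
          have := h2.2.1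
          simp only [List.length_cons] at this
          omega
      rw [if_neg hA]
      simp only [if_neg hc]

-- ===== VERDICT (by name: the statement is the Claim_ definition above) =====
theorem quotations_spec : Claim_equal_quotations := by
  intro args quote _ hpre
  unfold Spec_quotations
  have hq : quote.toList ≠ [] := by
    unfold Pre_quotations at hpre
    simp_all
  show quotations args quote = quotations_alt args quote
  simp only [quotations, quotations_alt]
  have hsplit : (PySem.Chars.split? (PySem.Chars.strip args.toList) quote.toList).getD []
      = pvParts quote.toList (PySem.Chars.strip args.toList) := by
    rw [PySem.Chars.split?, if_neg (by simp [hq]), Option.getD_some,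
      pvParts_eq_splitOn _ _ hq]
  rw [hsplit]
  have hA := pvA_assemble quote.toList
    (pvParts quote.toList (PySem.Chars.strip args.toList)) (pvP_ne_nil _ _ _)
  dsimp only at hA
  rw [hA, pvB_assemble quote.toList hq (PySem.Chars.strip args.toList)]
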